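-- pv_equiv track=rewrite | github.com/rworktual-hash/WingX | backend/planner.py | _match_pattern_label
-- ===== SOURCE A (Python) =====
-- def _match_pattern_label(text: str, patterns: list[tuple[tuple[str, ...], str]]) -> str:
--     for needles, label in patterns:
--         if all(needle in text for needle in needles):
--             return label
--     for needles, label in patterns:
--         if any(needle in text for needle in needles):
--             return label
--     return ""
-- ===== SOURCE B (Python) =====
-- def _match_pattern_label(text: str, patterns: list[tuple[tuple[str, ...], str]]) -> str:
--     fallback = None
--     for needles, label in patterns:
--         if all(needle in text for needle in needles):
--             return label
--         if fallback is None and any(needle in text for needle in needles):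
--             fallback = label
--     return fallback if fallback is not None else ""
-- ===== Notes on version B (the rewrite author's own statement) =====
-- stated objective: alternative
-- what changed: Merged A's two sequential passes over patterns into a single pass that returns on the first all-match and remembers the first any-match as a fallback.
import Mathlib
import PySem

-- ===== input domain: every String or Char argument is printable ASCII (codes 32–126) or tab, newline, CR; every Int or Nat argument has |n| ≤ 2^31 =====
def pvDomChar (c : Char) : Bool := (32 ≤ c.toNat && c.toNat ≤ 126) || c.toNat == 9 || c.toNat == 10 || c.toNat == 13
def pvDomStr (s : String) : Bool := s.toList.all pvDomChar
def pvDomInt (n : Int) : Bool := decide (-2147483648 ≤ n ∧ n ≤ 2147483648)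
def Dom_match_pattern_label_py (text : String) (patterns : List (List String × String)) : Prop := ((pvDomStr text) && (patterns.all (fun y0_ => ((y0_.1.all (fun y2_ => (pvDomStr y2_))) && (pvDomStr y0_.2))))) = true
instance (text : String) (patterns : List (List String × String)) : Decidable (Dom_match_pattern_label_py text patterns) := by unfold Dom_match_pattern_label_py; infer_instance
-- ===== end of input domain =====

-- B merges A's two sequential passes into a single pass with a remembered any-match fallback (alternative decomposition).

-- ===== PORT A =====
-- first loop: return label on the first pattern whose needles ALL occur in text
def pvAPass1 (text : String) : List (List String × String) → Option String
  | [] => none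
  | (needles, label) :: rest =>
      if needles.all (fun needle => PySem.Str.isIn needle text) then some label
      else pvAPass1 text rest

-- second loop: return label on the first pattern ANY of whose needles occurs in text
def pvAPass2 (text : String) : List (List String × String) → Option String
  | [] => none
  | (needles, label) :: rest =>
      if needles.any (fun needle => PySem.Str.isIn needle text) then some label
      else pvAPass2 text rest

def match_pattern_label_py (text : String) (patterns : List (List String × String)) : String :=
  match pvAPass1 text patterns with
  | some label => label
  | none =>
      match pvAPass2 text patterns with
      | some label => label
      | none => ""

-- ===== PORT B =====
-- single loop carrying the fallback (first any-match seen so far)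
def pvBLoop (text : String) : List (List String × String) → Option String → String
  | [], fallback => fallback.getD ""
  | (needles, label) :: rest, fallback =>
      if needles.all (fun needle => PySem.Str.isIn needle text) then label
      else
        pvBLoop text rest
          (if fallback.isNone && needles.any (fun needle => PySem.Str.isIn needle text)
           then some label else fallback)

def match_pattern_label_py_alt (text : String) (patterns : List (List String × String)) : String :=
  pvBLoop text patterns none

-- ===== PRECONDITION & SPEC =====
def Spec_match_pattern_label_py (text : String) (patterns : List (List String × String)) (out : String) : Prop := out = match_pattern_label_py_alt text patterns
instance (text : String) (patterns : List (List String × String)) (out : String) : Decidable (Spec_match_pattern_label_py text patterns out) := by unfold Spec_match_pattern_label_py; infer_instance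

-- ===== CLAIM (what is proved, stated in full; the proofs are below) =====
def Claim_equal_match_pattern_label_py : Prop := ∀ (text : String) (patterns : List (List String × String)), Dom_match_pattern_label_py text patterns → Spec_match_pattern_label_py text patterns (match_pattern_label_py text patterns)

-- ===== LEMMAS AND PROOFS =====
-- B's loop with fallback fb computes: first all-match label if any, else fb, else first any-match label, else "".
theorem pvBLoop_eq (text : String) (ps : List (List String × String)) (fb : Option String) :
    pvBLoop text ps fb =
      match pvAPass1 text ps with
      | some label => label
      | none => ((fb.orElse (fun _ => pvAPass2 text ps)).getD "") := by
  induction ps generalizing fb with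
  | nil => cases fb <;> simp [pvBLoop, pvAPass1, pvAPass2, Option.orElse]
  | cons hd tl ih =>
    obtain ⟨needles, label⟩ := hd
    simp only [pvBLoop, pvAPass1, pvAPass2]
    cases hall : needles.all (fun needle => PySem.Str.isIn needle text) with
    | true => rfl
    | false =>
      rw [if_neg Bool.false_ne_true, if_neg Bool.false_ne_true, ih]
      cases h1 : pvAPass1 text tl with
      | some l => rfl
      | none =>
        cases fb with
        | some x => rfl
        | none =>
          cases hany : needles.any (fun needle => PySem.Str.isIn needle text) with
          | true => rfl
          | false => rfl

-- ===== VERDICT (by name: the statement is the Claim_ definition above) =====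
theorem match_pattern_label_py_spec : Claim_equal_match_pattern_label_py := by
  intro text patterns _
  unfold Spec_match_pattern_label_py match_pattern_label_py match_pattern_label_py_alt
  rw [pvBLoop_eq]
  cases h1 : pvAPass1 text patterns <;> cases h2 : pvAPass2 text patterns <;>
    simp [Option.orElse]
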